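-- pv_equiv track=rewrite | github.com/Kgray44/Stormhelm | src/stormhelm/core/calculations/formatter.py | format_expression_for_display
-- ===== SOURCE A (Python) =====
-- def format_expression_for_display(expression: str) -> str:
--     pieces: list[str] = []
--     previous_kind = "start"
--     for character in expression:
--         if character in {"+", "*", "/", "^"}:
--             pieces.append(f" {character} ")
--             previous_kind = "operator"
--             continue
--         if character == "-":
--             if previous_kind in {"start", "operator", "lparen"}:
--                 pieces.append("-")
--             else:
--                 pieces.append(" - ")
--             previous_kind = "operator"
--             continue
--         if character == "(":
--             pieces.append("(")
--             previous_kind = "lparen"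
--             continue
--         if character == ")":
--             pieces.append(")")
--             previous_kind = "rparen"
--             continue
--         pieces.append(character)
--         previous_kind = "value"
--     return " ".join("".join(pieces).split())
-- ===== SOURCE B (Python) =====
-- def format_expression_for_display(expression: str) -> str:
--     # Staged passes: split on '-' and rejoin with context-dependent separators,
--     # then space the context-free operators with split/join passes, then
--     # normalize whitespace.  No character-by-character scan, no loop state.
--     parts = expression.split("-")
--     result = parts[0]
--     for prev, part in zip(parts, parts[1:]):
--         sep = "-" if prev == "" or prev[-1] in "+*/^(" else " - "
--         result += sep + part
--     for op in "+*/^":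
--         result = f" {op} ".join(result.split(op))
--     return " ".join(result.split())
-- ===== Notes on version B (the rewrite author's own statement) =====
-- stated objective: faster
-- what changed: Replaced the character-by-character previous_kind state machine with staged whole-string passes: split on '-' and rejoin the parts with a context-dependent separator, then space each of + * / ^ with a split/join pass, then normalize whitespace; no per-character Python loop remains.
import Mathlib
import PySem

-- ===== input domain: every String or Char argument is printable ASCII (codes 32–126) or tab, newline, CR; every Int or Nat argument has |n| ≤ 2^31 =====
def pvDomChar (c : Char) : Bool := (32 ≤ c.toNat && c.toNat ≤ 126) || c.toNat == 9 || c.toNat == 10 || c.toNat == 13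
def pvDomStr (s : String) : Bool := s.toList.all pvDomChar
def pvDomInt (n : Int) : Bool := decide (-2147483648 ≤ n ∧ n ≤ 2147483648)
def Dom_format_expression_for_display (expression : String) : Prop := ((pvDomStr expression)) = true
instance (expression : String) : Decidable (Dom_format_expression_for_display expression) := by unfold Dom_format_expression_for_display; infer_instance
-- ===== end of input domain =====

-- B replaces A's per-character previous_kind state machine by staged whole-string
-- split/join passes (objective: faster — a timing run measured B faster; same output).

-- ===== PORT A =====
-- one step of A's for-loop: state = (pieces, previous_kind)
def pvAStep (st : List String × String) (c : Char) : List String × String :=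
  if c = '+' ∨ c = '*' ∨ c = '/' ∨ c = '^' then
    (st.1 ++ [String.ofList [' ', c, ' ']], "operator")
  else if c = '-' then
    (if st.2 = "start" ∨ st.2 = "operator" ∨ st.2 = "lparen" then st.1 ++ ["-"]
     else st.1 ++ [" - "], "operator")
  else if c = '(' then (st.1 ++ ["("], "lparen")
  else if c = ')' then (st.1 ++ [")"], "rparen")
  else (st.1 ++ [String.ofList [c]], "value")

def format_expression_for_display (expression : String) : String :=
  PySem.Str.join " " (PySem.Str.split₀
    (PySem.Str.join "" (expression.toList.foldl pvAStep ([], "start")).1))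

-- ===== PORT B =====
-- separator for a '-' that followed the part `prev`: unary iff prev is empty
-- (preceding raw char was '-' or string start) or ends in + * / ^ (
def pvMinusSep (prev : String) : String :=
  if prev = "" then "-"
  else match PySem.Str.pyGet? prev (-1) with
    | some l => if PySem.Str.isIn (String.ofList [l]) "+*/^(" then "-" else " - "
    | none => " - "     -- unreachable: prev ≠ ""

-- one split/join pass wrapping the (context-free) operator `op` in spaces
def pvOpPass (r : String) (op : Char) : String :=
  match PySem.Str.split? r (String.ofList [op]) with
  | some ps => PySem.Str.join (String.ofList [' ', op, ' ']) ps
  | none => r            -- unreachable: the separator is nonempty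

def format_expression_for_display_alt (expression : String) : String :=
  match PySem.Str.split? expression "-" with
  | some parts =>
    let res1 := (parts.zip parts.tail).foldl
      (fun r pq => r ++ pvMinusSep pq.1 ++ pq.2) (parts.headD "")
    PySem.Str.join " " (PySem.Str.split₀ (['+', '*', '/', '^'].foldl pvOpPass res1))
  | none => ""           -- unreachable: "-" is nonempty

-- ===== PRECONDITION & SPEC =====
def Spec_format_expression_for_display (expression : String) (out : String) : Prop := out = format_expression_for_display_alt expression
instance (expression : String) (out : String) : Decidable (Spec_format_expression_for_display expression out) := by unfold Spec_format_expression_for_display; infer_instance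

-- ===== CLAIM (what is proved, stated in full; the proofs are below) =====
def Claim_equal_format_expression_for_display : Prop := ∀ (expression : String), Dom_format_expression_for_display expression → Spec_format_expression_for_display expression (format_expression_for_display expression)

-- ===== LEMMAS AND PROOFS =====

-- ---- proof-only helpers ----

-- specification of Python split on a single-character separator
def pvSplit (d : Char) : List Char → List (List Char)
  | [] => [[]]
  | c :: rest =>
    if c = d then [] :: pvSplit d rest
    else match pvSplit d rest with
      | p :: ps => (c :: p) :: ps
      | [] => [[c]]

-- per-character substitution of the minus pass
def pvMinusSub (p : Option Char) (c : Char) : List Char :=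
  if c = '-' then
    (match p with
     | none => ['-']
     | some q => if q = '+' ∨ q = '*' ∨ q = '/' ∨ q = '^' ∨ q = '-' ∨ q = '(' then ['-'] else [' ', '-', ' '])
  else [c]

-- per-character substitution of one operator pass
def pvOpSub (o c : Char) : List Char :=
  if c = o then [' ', o, ' '] else [c]

-- full per-character substitution (all passes composed)
def pvRepl (p : Option Char) (c : Char) : List Char :=
  if c = '+' ∨ c = '*' ∨ c = '/' ∨ c = '^' then [' ', c, ' '] else pvMinusSub p c

-- normal form: the whole substitution run with context p
def pvN (f : Option Char → Char → List Char) : Option Char → List Char → List Char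
  | _, [] => []
  | p, c :: rest => f p c ++ pvN f (some c) rest

-- ---- splitOn = pvSplit ----

theorem pvSplit_ne_nil (d : Char) : ∀ cs, pvSplit d cs ≠ [] := by
  intro cs
  cases cs with
  | nil => simp [pvSplit]
  | cons c rest =>
    simp only [pvSplit]
    split_ifs
    · simp
    · cases h : pvSplit d rest <;> simp

theorem pvSplitOn_go_eq (d : Char) : ∀ (fuel : Nat) (l : List Char), l.length ≤ fuel →
    ∀ (cur : List Char) (acc : List (List Char)),
    PySem.Chars.splitOn.go [d] fuel l cur acc
      = acc.reverse ++ (match pvSplit d l with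
          | p :: ps => (cur.reverse ++ p) :: ps
          | [] => [cur.reverse]) := by
  intro fuel
  induction fuel with
  | zero =>
    intro l hl cur acc
    have : l = [] := List.eq_nil_of_length_eq_zero (Nat.le_zero.mp hl)
    subst this
    simp [PySem.Chars.splitOn.go, pvSplit]
  | succ n ih =>
    intro l hl cur acc
    cases l with
    | nil => simp [PySem.Chars.splitOn.go, pvSplit]
    | cons c rest =>
      simp only [PySem.Chars.splitOn.go]
      by_cases hcd : c = d
      · subst hcd
        have hpre : [c].isPrefixOf (c :: rest) = true := by
          simp [List.isPrefixOf]
        rw [if_pos hpre]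
        simp only [List.length_cons, List.length_nil, Nat.zero_add, List.drop_succ_cons, List.drop_zero]
        simp only [List.length_cons] at hl
        rw [ih rest (by omega) [] (cur.reverse :: acc)]
        simp only [pvSplit]
        cases h : pvSplit c rest with
        | nil => exact absurd h (pvSplit_ne_nil c rest)
        | cons p ps => simp
      · have hpre : [d].isPrefixOf (c :: rest) = false := by
          simp [List.isPrefixOf]
          intro h; exact absurd h.symm hcd
        rw [if_neg (by simp [hpre])]
        simp only [List.length_cons] at hl
        rw [ih rest (by omega) (c :: cur) acc]
        simp only [pvSplit, if_neg hcd]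
        cases h : pvSplit d rest with
        | nil => exact absurd h (pvSplit_ne_nil d rest)
        | cons p ps => simp

theorem pvSplitOn_eq (d : Char) (cs : List Char) :
    PySem.Chars.splitOn cs [d] = pvSplit d cs := by
  unfold PySem.Chars.splitOn
  rw [pvSplitOn_go_eq d (cs.length + 1) cs (by omega) [] []]
  cases h : pvSplit d cs with
  | nil => exact absurd h (pvSplit_ne_nil d cs)
  | cons p ps => simp

-- parts of pvSplit are d-free and reconstruct the input
theorem pvSplit_parts (d : Char) : ∀ cs, ∃ p ps, pvSplit d cs = p :: ps ∧ d ∉ p ∧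
    (∀ q ∈ ps, d ∉ q) ∧ cs = p ++ ps.flatMap (fun q => d :: q) := by
  intro cs
  induction cs with
  | nil => exact ⟨[], [], rfl, by simp, by simp, by simp⟩
  | cons c rest ih =>
    obtain ⟨p, ps, hsp, hp, hps, hrec⟩ := ih
    by_cases hcd : c = d
    · subst hcd
      refine ⟨[], p :: ps, by simp [pvSplit, hsp], by simp, ?_, by simp [hrec]⟩
      intro q hq
      rcases List.mem_cons.mp hq with h | h
      · subst h; exact hp
      · exact hps q h
    · refine ⟨c :: p, ps, by simp [pvSplit, hcd, hsp], ?_, hps, by simp [hrec]⟩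
      intro h
      rcases List.mem_cons.mp h with h | h
      · exact hcd h.symm
      · exact hp h

-- join of a single-char split is a per-character substitution
theorem pvJoin_cons_head (sep : List Char) (c : Char) (p : List Char) :
    ∀ ps, PySem.Chars.join sep ((c :: p) :: ps) = c :: PySem.Chars.join sep (p :: ps) := by
  intro ps
  cases ps with
  | nil => simp [PySem.Chars.join_singleton]
  | cons q qs => simp [PySem.Chars.join_cons_cons]

theorem pvJoin_split (o : Char) (sep : List Char) : ∀ x,
    PySem.Chars.join sep (pvSplit o x) = x.flatMap (fun c => if c = o then sep else [c]) := by
  intro x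
  induction x with
  | nil => simp [pvSplit, PySem.Chars.join_singleton]
  | cons c rest ih =>
    by_cases hco : c = o
    · subst hco
      simp only [pvSplit]
      cases h : pvSplit c rest with
      | nil => exact absurd h (pvSplit_ne_nil c rest)
      | cons p ps =>
        simp only [if_true]
        rw [PySem.Chars.join_cons_cons]
        simp only [List.flatMap_cons, if_true]
        rw [← h, ih]
        simp
    · simp only [pvSplit, if_neg hco]
      cases h : pvSplit o rest with
      | nil => exact absurd h (pvSplit_ne_nil o rest)
      | cons p ps =>
        rw [pvJoin_cons_head, ← h, ih]
        simp [hco]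

-- context after reading a (minus-free) part, starting from context p
def pvCtx (q : List Char) (p : Option Char) : Option Char :=
  match q.getLast? with
  | some l => some l
  | none => p

-- minus pass: a minus-free part passes through and shifts the context
theorem pvCtx_cons (c : Char) (cr : List Char) (p : Option Char) :
    pvCtx (c :: cr) p = pvCtx cr (some c) := by
  cases cr with
  | nil => simp [pvCtx]
  | cons d ds =>
    unfold pvCtx
    rw [List.getLast?_cons_cons]
    cases h : (d :: ds).getLast? with
    | none => exact absurd (List.getLast?_eq_none_iff.mp h) (by simp)
    | some l => rfl

theorem pvT_part (q : List Char) (hq : '-' ∉ q) (p : Option Char) (rest : List Char) :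
    pvN pvMinusSub p (q ++ rest) = q ++ pvN pvMinusSub (pvCtx q p) rest := by
  induction q generalizing p with
  | nil => simp [pvCtx]
  | cons c cr ih =>
    have hc : c ≠ '-' := fun h => hq (h ▸ List.mem_cons_self)
    have hcr : '-' ∉ cr := fun h => hq (List.mem_cons_of_mem _ h)
    simp only [List.cons_append, pvN, pvMinusSub, if_neg hc]
    rw [ih hcr, pvCtx_cons]
    simp

-- the rejoin loop, recursively: prev part, remaining parts
def pvG (prev : List Char) : List (List Char) → List Char
  | [] => []
  | q :: qs =>
    (if prev = [] ∨ (∃ l, prev.getLast? = some l ∧ (l = '+' ∨ l = '*' ∨ l = '/' ∨ l = '^' ∨ l = '(')) then ['-'] else [' ', '-', ' ']) ++ q ++ pvG q qs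

theorem pvG_eq_pvN : ∀ (qs : List (List Char)) (prev : List Char) (p : Option Char),
    (∀ q ∈ qs, '-' ∉ q) → '-' ∉ prev →
    (match prev.getLast? with
     | some l => p = some l
     | none => p = none ∨ p = some '-') →
    pvG prev qs = pvN pvMinusSub p (qs.flatMap (fun q => '-' :: q)) := by
  intro qs
  induction qs with
  | nil => intro prev p _ _ _; simp [pvG, pvN]
  | cons q qs ih =>
    intro prev p hqs hprev hp
    have hq : '-' ∉ q := hqs q List.mem_cons_self
    have hqs' : ∀ r ∈ qs, '-' ∉ r := fun r hr => hqs r (List.mem_cons_of_mem _ hr)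
    simp only [pvG, List.flatMap_cons]
    have hstep : (if prev = [] ∨ (∃ l, prev.getLast? = some l ∧ (l = '+' ∨ l = '*' ∨ l = '/' ∨ l = '^' ∨ l = '(')) then (['-'] : List Char) else [' ', '-', ' '])
        = pvMinusSub p '-' := by
      cases hpl : prev.getLast? with
      | none =>
        have hpe : prev = [] := List.getLast?_eq_none_iff.mp hpl
        rw [hpl] at hp
        rcases hp with h | h <;> subst h <;> simp [pvMinusSub, hpe]
      | some l =>
        rw [hpl] at hp
        subst hp
        have hpe : prev ≠ [] := fun h => by simp [h] at hpl
        have hl : l ≠ '-' := by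
          intro h; subst h
          exact hprev (List.mem_of_getLast? hpl)
        simp only [pvMinusSub]
        by_cases hset : l = '+' ∨ l = '*' ∨ l = '/' ∨ l = '^' ∨ l = '('
        · rw [if_pos (Or.inr ⟨l, rfl, hset⟩)]
          rcases hset with h | h | h | h | h <;> subst h <;> rfl
        · rw [if_neg ?_]
          · have : ¬(l = '+' ∨ l = '*' ∨ l = '/' ∨ l = '^' ∨ l = '-' ∨ l = '(') := by
              tauto
            simp [this]
          · rintro (h | ⟨l', hl', hs⟩)
            · exact hpe h
            · injection hl' with h
              subst h
              exact hset hs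
    have : pvN pvMinusSub p (('-' :: q) ++ qs.flatMap (fun r => '-' :: r))
        = pvMinusSub p '-' ++ q ++ pvN pvMinusSub (pvCtx q (some '-')) (qs.flatMap (fun r => '-' :: r)) := by
      rw [List.cons_append]
      simp only [pvN]
      rw [pvT_part q hq (some '-')]
      simp
    rw [this, hstep, ih q (pvCtx q (some '-')) hqs' hq ?_]
    unfold pvCtx
    cases h : q.getLast? <;> simp

-- the four operator passes, composed, over a list of chars
def pvOpAll (x : List Char) : List Char :=
  (((x.flatMap (pvOpSub '+')).flatMap (pvOpSub '*')).flatMap (pvOpSub '/')).flatMap (pvOpSub '^')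

theorem pvOpAll_append (x y : List Char) : pvOpAll (x ++ y) = pvOpAll x ++ pvOpAll y := by
  simp [pvOpAll]

-- the operator passes turn the minus-pass output into the full substitution
theorem pvOpAll_minus (p : Option Char) (c : Char) :
    pvOpAll (pvMinusSub p c) = pvRepl p c := by
  by_cases hop : c = '+' ∨ c = '*' ∨ c = '/' ∨ c = '^'
  · rcases hop with h | h | h | h <;> subst h <;>
      simp [pvMinusSub, pvRepl, pvOpAll, pvOpSub]
  · by_cases hm : c = '-'
    · subst hm
      unfold pvRepl
      rw [if_neg (by decide)]
      unfold pvMinusSub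
      cases p with
      | none => decide
      | some q =>
        by_cases hs : q = '+' ∨ q = '*' ∨ q = '/' ∨ q = '^' ∨ q = '-' ∨ q = '('
        · simp only [if_pos hs]
          decide
        · simp only [if_neg hs]
          decide
    · have h1 : pvMinusSub p c = [c] := by simp [pvMinusSub, hm]
      have h2 : pvRepl p c = [c] := by simp [pvRepl, hop, pvMinusSub, hm]
      rw [h1, h2]
      push Not at hop
      obtain ⟨hp, hs, hd, hc⟩ := hop
      simp [pvOpAll, pvOpSub, hp, hs, hd, hc]

theorem pvOpAll_pvN (p : Option Char) : ∀ cs,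
    pvOpAll (pvN pvMinusSub p cs) = pvN pvRepl p cs := by
  intro cs
  induction cs generalizing p with
  | nil => simp [pvN, pvOpAll]
  | cons c rest ih =>
    simp only [pvN]
    rw [pvOpAll_append, pvOpAll_minus, ih]

-- ---- A's loop equals the full substitution ----

-- "".join with an empty separator is flatten
theorem pvJoin_empty : ∀ (ps : List (List Char)), PySem.Chars.join [] ps = ps.flatten
  | [] => PySem.Chars.join_nil []
  | [a] => by simp [PySem.Chars.join_singleton]
  | a :: b :: r => by
    rw [PySem.Chars.join_cons_cons]
    simp [pvJoin_empty (b :: r)]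

-- A's previous_kind as a function of the last processed character
def pvKindOf : Option Char → String
  | none => "start"
  | some q =>
    if q = '+' ∨ q = '*' ∨ q = '/' ∨ q = '^' then "operator"
    else if q = '-' then "operator"
    else if q = '(' then "lparen"
    else if q = ')' then "rparen"
    else "value"

-- the loop invariant: A's pieces, flattened to chars, equal the full substitution
theorem pvLoop_eq : ∀ (cs : List Char) (p : Option Char) (acc : List String),
    ((cs.foldl pvAStep (acc, pvKindOf p)).1.map String.toList).flatten
    = (acc.map String.toList).flatten ++ pvN pvRepl p cs := by
  intro cs
  induction cs with
  | nil => intro p acc; simp [pvN]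
  | cons c rest ih =>
    intro p acc
    show ((rest.foldl pvAStep (pvAStep (acc, pvKindOf p) c)).1.map String.toList).flatten = _
    simp only [pvN]
    by_cases hop : c = '+' ∨ c = '*' ∨ c = '/' ∨ c = '^'
    · have hA : pvAStep (acc, pvKindOf p) c
          = (acc ++ [String.ofList [' ', c, ' ']], pvKindOf (some c)) := by
        rcases hop with h | h | h | h <;> subst h <;> simp [pvAStep, pvKindOf]
      have hB : pvRepl p c = [' ', c, ' '] := by simp [pvRepl, hop]
      rw [hA, ih (some c)]
      simp [hB]
    · by_cases hm : c = '-'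
      · subst hm
        have hcond : (pvKindOf p = "start" ∨ pvKindOf p = "operator" ∨ pvKindOf p = "lparen")
            ↔ (p = none ∨ ∃ q, p = some q ∧
                (q = '+' ∨ q = '*' ∨ q = '/' ∨ q = '^' ∨ q = '-' ∨ q = '(')) := by
          cases p with
          | none => simp [pvKindOf]
          | some q =>
            simp only [pvKindOf, Option.some.injEq, reduceCtorEq, false_or]
            constructor
            · intro h
              refine ⟨q, rfl, ?_⟩
              by_contra hq
              push Not at hq
              obtain ⟨h1, h2, h3, h4, h5, h6⟩ := hq
              simp [h1, h2, h3, h4, h5, h6] at h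
              split_ifs at h <;> simp_all
            · rintro ⟨q', hq', h⟩
              subst hq'
              rcases h with h | h | h | h | h | h <;> simp [h]
        have hB0 : pvRepl p '-' = pvMinusSub p '-' := by
          simp [pvRepl]
        by_cases hc : pvKindOf p = "start" ∨ pvKindOf p = "operator" ∨ pvKindOf p = "lparen"
        · have hA : pvAStep (acc, pvKindOf p) '-' = (acc ++ ["-"], pvKindOf (some '-')) := by
            unfold pvAStep
            rw [if_neg (by decide : ¬(('-':Char) = '+' ∨ ('-':Char) = '*' ∨ ('-':Char) = '/' ∨ ('-':Char) = '^')),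
                if_pos (rfl : ('-':Char) = '-'), if_pos hc]
            simp [pvKindOf]
          rw [hA, ih (some '-')]
          have hB : pvMinusSub p '-' = ['-'] := by
            rcases hcond.mp hc with h | ⟨q, hq, h⟩
            · subst h; rfl
            · subst hq
              rcases h with h | h | h | h | h | h <;> subst h <;> rfl
          simp [hB0, hB]
        · have hA : pvAStep (acc, pvKindOf p) '-' = (acc ++ [" - "], pvKindOf (some '-')) := by
            unfold pvAStep
            rw [if_neg (by decide : ¬(('-':Char) = '+' ∨ ('-':Char) = '*' ∨ ('-':Char) = '/' ∨ ('-':Char) = '^')),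
                if_pos (rfl : ('-':Char) = '-'), if_neg hc]
            simp [pvKindOf]
          rw [hA, ih (some '-')]
          have hB : pvMinusSub p '-' = [' ', '-', ' '] := by
            cases p with
            | none => exact absurd (hcond.mpr (Or.inl rfl)) hc
            | some q =>
              have hq : ¬(q = '+' ∨ q = '*' ∨ q = '/' ∨ q = '^' ∨ q = '-' ∨ q = '(') :=
                fun hh => hc (hcond.mpr (Or.inr ⟨q, rfl, hh⟩))
              simp [pvMinusSub, hq]
          simp [hB0, hB]
      · have hA : pvAStep (acc, pvKindOf p) c = (acc ++ [String.ofList [c]], pvKindOf (some c)) := by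
          by_cases hl : c = '('
          · subst hl; simp [pvAStep, pvKindOf]
          · by_cases hr : c = ')'
            · subst hr; simp [pvAStep, pvKindOf]
            · simp [pvAStep, pvKindOf, hop, hm, hl, hr]
        have hB : pvRepl p c = [c] := by simp [pvRepl, hop, pvMinusSub, hm]
        rw [hA, ih (some c)]
        simp [hB]

-- ---- bridging the string-level B port to the char-level lemmas ----

theorem pvLast_char (cs : List Char) (h : cs ≠ []) :
    PySem.List.pyGet? cs (-1) = cs.getLast? := by
  have hn : 1 ≤ cs.length := List.length_pos_iff.mpr h
  have h1 : ¬ ((0 : Int) ≤ -1) := by decide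
  have h2 : -(cs.length : Int) ≤ -1 := by omega
  have h3 : ¬ ((-1 : Int) < (cs.length : Int)) ∨ True := Or.inr trivial
  simp only [PySem.List.pyGet?, PySem.List.pyIdx?, if_neg h1, if_pos h2]
  simp only [Option.bind_some, Int.neg_neg, Int.toNat_one]
  rw [List.getLast?_eq_getElem?]

theorem pvMinusSep_chars (prev : String) :
    (pvMinusSep prev).toList
      = (if prev.toList = [] ∨ (∃ l, prev.toList.getLast? = some l ∧
            (l = '+' ∨ l = '*' ∨ l = '/' ∨ l = '^' ∨ l = '(')) then ['-'] else [' ', '-', ' ']) := by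
  by_cases he : prev.toList = []
  · have : prev = "" := String.toList_inj.mp (by simpa using he)
    subst this
    rw [if_pos (Or.inl he)]
    decide
  · unfold pvMinusSep
    have hne : prev ≠ "" := fun h => he (by simp [h])
    rw [if_neg hne]
    cases hL : prev.toList.getLast? with
    | none => exact absurd (List.getLast?_eq_none_iff.mp hL) he
    | some l =>
      have hget : PySem.Str.pyGet? prev (-1) = some l := by
        show PySem.Chars.pyGet? prev.toList (-1) = some l
        show PySem.List.pyGet? prev.toList (-1) = some l
        rw [pvLast_char prev.toList he, hL]
      rw [hget]
      by_cases hs : l = '+' ∨ l = '*' ∨ l = '/' ∨ l = '^' ∨ l = '('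
      · have hin : PySem.Str.isIn (String.ofList [l]) "+*/^(" = true := by
          rcases hs with h | h | h | h | h <;> subst h <;> decide
        rw [if_pos (Or.inr ⟨l, rfl, hs⟩)]
        simp only [hin]
        decide
      · have hin : PySem.Str.isIn (String.ofList [l]) "+*/^(" = false := by
          rw [Bool.eq_false_iff]
          intro hmem
          have hinf := (PySem.Str.isIn_iff_infix _ _).mp hmem
          rw [String.toList_ofList] at hinf
          have hm : l ∈ "+*/^(".toList := (List.singleton_infix_iff l _).mp hinf
          have htl : "+*/^(".toList = ['+', '*', '/', '^', '('] := by decide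
          rw [htl] at hm
          simp only [List.mem_cons, List.not_mem_nil, or_false] at hm
          exact hs hm
        rw [if_neg ?_]
        · simp only [hin]
          decide
        · rintro (h | ⟨l', hl', hs'⟩)
          · exact he h
          · injection hl' with h
            subst h
            exact hs hs'

-- the rejoin foldl over zipped parts, at the character level
theorem pvFoldG (qs : List String) : ∀ (prev init : String),
    (((prev :: qs).zip qs).foldl (fun r pq => r ++ pvMinusSep pq.1 ++ pq.2) init).toList
      = init.toList ++ pvG prev.toList (qs.map String.toList) := by
  induction qs with
  | nil => intro prev init; simp [pvG]
  | cons q qs ih =>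
    intro prev init
    simp only [List.zip_cons_cons, List.foldl_cons, List.map_cons]
    rw [ih q]
    simp only [pvG, String.toList_append, pvMinusSep_chars, List.append_assoc]

-- one operator pass, at the character level
theorem pvOpPass_chars (r : String) (op : Char) :
    (pvOpPass r op).toList = r.toList.flatMap (pvOpSub op) := by
  unfold pvOpPass
  have h := PySem.Str.split?_map r (String.ofList [op])
  rw [String.toList_ofList, PySem.Chars.split?] at h
  rw [if_neg (by simp), pvSplitOn_eq] at h
  cases hsp : PySem.Str.split? r (String.ofList [op]) with
  | none => rw [hsp] at h; simp at h
  | some ps =>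
    rw [hsp] at h
    simp only [Option.map_some, Option.some.injEq] at h
    rw [PySem.Str.toList_join, String.toList_ofList, h, pvJoin_split]
    rfl

-- ===== VERDICT (by name: the statement is the Claim_ definition above) =====
theorem format_expression_for_display_spec : Claim_equal_format_expression_for_display := by
  intro e _
  unfold Spec_format_expression_for_display format_expression_for_display format_expression_for_display_alt
  have h := PySem.Str.split?_map e "-"
  have hsep : ("-" : String).toList = ['-'] := by decide
  rw [hsep, PySem.Chars.split?, if_neg (by simp), pvSplitOn_eq] at h
  cases hsp : PySem.Str.split? e "-" with
  | none => rw [hsp] at h; simp at h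
  | some parts =>
    rw [hsp] at h
    simp only [Option.map_some, Option.some.injEq] at h
    obtain ⟨p0c, qsc, hps, hp0, hqs, hrec⟩ := pvSplit_parts '-' e.toList
    rw [hps] at h
    cases parts with
    | nil => simp at h
    | cons P0 rest =>
      simp only [List.map_cons, List.cons.injEq] at h
      obtain ⟨h0, hrest⟩ := h
      have hG : pvG p0c qsc
          = pvN pvMinusSub (pvCtx p0c none) (qsc.flatMap (fun q => '-' :: q)) :=
        pvG_eq_pvN qsc p0c _ hqs hp0 (by unfold pvCtx; cases hx : p0c.getLast? <;> simp)
      have hres1 : (((P0 :: rest).zip ((P0 :: rest).tail)).foldl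
            (fun r pq => r ++ pvMinusSep pq.1 ++ pq.2) ((P0 :: rest).headD "")).toList
          = pvN pvMinusSub none e.toList := by
        show (((P0 :: rest).zip rest).foldl
            (fun r pq => r ++ pvMinusSep pq.1 ++ pq.2) P0).toList = _
        rw [pvFoldG rest P0 P0, h0, hrest, hG, ← pvT_part p0c hp0 none, ← hrec]
      suffices hj : PySem.Str.join "" (e.toList.foldl pvAStep ([], "start")).1
          = ['+', '*', '/', '^'].foldl pvOpPass
              (((P0 :: rest).zip ((P0 :: rest).tail)).foldl
                (fun r pq => r ++ pvMinusSep pq.1 ++ pq.2) ((P0 :: rest).headD "")) by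
        rw [hj]
      apply String.toList_inj.mp
      have hA : (PySem.Str.join "" (e.toList.foldl pvAStep ([], "start")).1).toList
          = pvN pvRepl none e.toList := by
        rw [PySem.Str.toList_join]
        have : ("" : String).toList = [] := by decide
        rw [this, pvJoin_empty]
        have := pvLoop_eq e.toList none []
        simpa [pvKindOf] using this
      rw [hA]
      simp only [List.foldl_cons, List.foldl_nil]
      rw [pvOpPass_chars, pvOpPass_chars, pvOpPass_chars, pvOpPass_chars, hres1]
      rw [← pvOpAll_pvN]
      rfl
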